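-- pv_equiv track=rewrite | github.com/tabarcea-augustus/advent_code_2023 | day14/part2.py | spin_cycle
-- ===== SOURCE A (Python) =====
-- def transpose(grid):
--     return tuple("".join(row) for row in zip(*grid))
--
-- def spin_cycle(grid):
--     grid = transpose(grid)
--     tilted_grid = []
--     for row in grid:
--         tilted_grid.append(( "#".join( "".join(sorted(char, reverse=True)) for char in row.split('#')) ))
--     grid = tuple(tilted_grid)
--
--     grid = transpose(grid)
--     tilted_grid = []
--     for row in grid:
--         tilted_grid.append(( "#".join( "".join(sorted(char, reverse=True)) for char in row.split('#')) ))
--     grid = tuple(tilted_grid)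
--
--     grid = transpose(grid)
--     tilted_grid = []
--     for row in grid:
--         tilted_grid.append(( "#".join( "".join(sorted(char, reverse=False)) for char in row.split('#')) ))
--     grid = tuple(tilted_grid)
--
--     grid = transpose(grid)
--     tilted_grid = []
--     for row in grid:
--         tilted_grid.append(( "#".join( "".join(sorted(char, reverse=False)) for char in row.split('#')) ))
--     grid = tuple(tilted_grid)
--
--     return grid
-- ===== SOURCE B (Python) =====
-- def _transpose(rows):
--     if not rows:
--         return []
--     m = min(len(r) for r in rows)
--     return [[r[j] for r in rows] for j in range(m)]
--
--
-- def _tilt_line(line, desc):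
--     # one left-to-right scan; counting sort (ASCII buckets) per '#'-free segment
--     out = []
--     i = 0
--     n = len(line)
--     while i < n:
--         if line[i] == '#':
--             out.append('#')
--             i += 1
--         else:
--             counts = [0] * 128
--             while i < n and line[i] != '#':
--                 counts[ord(line[i])] += 1
--                 i += 1
--             rng = reversed(range(128)) if desc else range(128)
--             for c in rng:
--                 out.append(chr(c) * counts[c])
--     return ''.join(out)
--
--
-- def spin_cycle(grid):
--     g = [list(r) for r in grid]
--     for desc in (True, True, False, False):
--         g = [_tilt_line(col, desc) for col in _transpose(g)]
--     return tuple(''.join(r) for r in g)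
-- ===== Notes on version B (the rewrite author's own statement) =====
-- stated objective: alternative
-- what changed: Each tilt is a single left-to-right scan per line with 128 ASCII counting buckets flushed at each '#' (counting sort of every segment), and the transpose is built by direct index access up to the shortest row, instead of A's split-on-'#' / comparison-sort / join per row and zip(*)-based transpose.
import Mathlib
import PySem

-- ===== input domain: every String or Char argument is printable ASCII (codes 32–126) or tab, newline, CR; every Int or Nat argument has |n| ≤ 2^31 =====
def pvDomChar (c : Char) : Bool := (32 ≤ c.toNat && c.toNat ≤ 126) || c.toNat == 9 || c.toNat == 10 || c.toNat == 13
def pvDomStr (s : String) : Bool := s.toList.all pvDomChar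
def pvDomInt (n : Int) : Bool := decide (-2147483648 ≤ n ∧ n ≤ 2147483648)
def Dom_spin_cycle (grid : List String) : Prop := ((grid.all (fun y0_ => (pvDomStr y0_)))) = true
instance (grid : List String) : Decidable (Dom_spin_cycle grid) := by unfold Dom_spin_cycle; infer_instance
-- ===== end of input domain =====

-- B replaces A's per-row split-on-'#' / comparison-sort / join tilt by a single scan per line with
-- 128 ASCII counting buckets flushed at each '#', and A's zip(*)-transpose by index access up to the
-- shortest row (objective: alternative algorithm, similar cost).

-- ===== PORT A =====
-- variadic zip(*grid) ported by hand (PySem has only binary zip): take the heads of all rows while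
-- every row is nonempty — exact: Python's zip stops at the shortest iterable.
def pvHeadsTails : List (List Char) → Option (List Char × List (List Char))
  | [] => some ([], [])
  | [] :: _ => none
  | (c :: cs) :: rest => (pvHeadsTails rest).map (fun p => (c :: p.1, cs :: p.2))

-- termination measure for pvZipStar (cited in its decreasing_by)
theorem pvHeadsTails_sum (g : List (List Char)) (hs : List Char) (ts : List (List Char))
    (h : pvHeadsTails g = some (hs, ts)) :
    (ts.map List.length).sum + g.length = (g.map List.length).sum := by
  induction g generalizing hs ts with
  | nil => simp [pvHeadsTails] at h; simp [← h.2]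
  | cons r rest ih =>
    match r with
    | [] => simp [pvHeadsTails] at h
    | c :: cs =>
      simp only [pvHeadsTails, Option.map_eq_some_iff] at h
      obtain ⟨⟨hs', ts'⟩, hrec, heq⟩ := h
      cases heq
      have := ih hs' ts' hrec
      simp [List.map_cons, List.sum_cons]
      omega

def pvZipStar (g : List (List Char)) : List (List Char) :=
  if hg : g = [] then []
  else
    match h : pvHeadsTails g with
    | none => []
    | some (hs, ts) => hs :: pvZipStar ts
termination_by (g.map List.length).sum
decreasing_by
  have := pvHeadsTails_sum g hs ts h
  have : 0 < g.length := by cases g with | nil => exact absurd rfl hg | cons a b => simp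
  omega

-- "#".join("".join(sorted(seg, reverse=rev)) for seg in row.split('#'))
def pvTiltRowA (rev : Bool) (row : List Char) : List Char :=
  PySem.Chars.join ['#']
    ((PySem.Chars.splitOn row ['#']).map
      (fun seg => PySem.Chars.join [] ((PySem.List.sorted seg (fun x => x) rev).map (fun ch => [ch]))))

def spin_cycle (grid : List String) : List String :=
  let g0 := grid.map String.toList
  let g1 := (pvZipStar g0).map (pvTiltRowA true)
  let g2 := (pvZipStar g1).map (pvTiltRowA true)
  let g3 := (pvZipStar g2).map (pvTiltRowA false)
  let g4 := (pvZipStar g3).map (pvTiltRowA false)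
  g4.map (fun r => String.ofList r)

-- ===== PORT B =====
-- counts = [0]*128; counts[ord(ch)] += 1 for ch in seg (List.set is exact for ord < 128, the stated ASCII domain)
def pvCountsOf (seg : List Char) : List Nat :=
  seg.foldl (fun cnt ch => cnt.set ch.toNat (cnt.getD ch.toNat 0 + 1)) (List.replicate 128 0)

-- ''.join(chr(c) * counts[c] for c in (reversed(range(128)) if desc else range(128)))
def pvEmit (desc : Bool) (counts : List Nat) : List Char :=
  (if desc then (List.range 128).reverse else List.range 128).flatMap
    (fun c => List.replicate (counts.getD c 0) (Char.ofNat c))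

-- one scan: '#' is copied, a maximal '#'-free segment is bucket-counted and flushed in sorted order
def pvTiltLineB (desc : Bool) : List Char → List Char
  | [] => []
  | c :: cs =>
    if c = '#' then '#' :: pvTiltLineB desc cs
    else
      pvEmit desc (pvCountsOf (c :: cs.takeWhile (fun x => x ≠ '#')))
        ++ pvTiltLineB desc (cs.dropWhile (fun x => x ≠ '#'))
termination_by l => l.length
decreasing_by
  · simp
  · have := List.length_dropWhile_le (fun x => !decide (x = '#')) cs
    simp; omega

-- [[r[j] for r in rows] for j in range(min(len(r) for r in rows))] ; rows ≠ [] there, so the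
-- defaults of minD and getD are never reached (j < min length ≤ every row's length)
def pvTransposeB (rows : List (List Char)) : List (List Char) :=
  if rows = [] then []
  else
    let m := PySem.List.minD (rows.map List.length) (fun x => x) 0
    (List.range m).map (fun j => rows.map (fun r => r.getD j ' '))

def spin_cycle_alt (grid : List String) : List String :=
  let g0 := grid.map String.toList
  let gf := [true, true, false, false].foldl (fun g desc => (pvTransposeB g).map (pvTiltLineB desc)) g0
  gf.map (fun r => String.ofList r)

-- ===== PRECONDITION & SPEC =====
def Spec_spin_cycle (grid : List String) (out : List String) : Prop := out = spin_cycle_alt grid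
instance (grid : List String) (out : List String) : Decidable (Spec_spin_cycle grid out) := by unfold Spec_spin_cycle; infer_instance

-- ===== CLAIM (what is proved, stated in full; the proofs are below) =====
def Claim_equal_spin_cycle : Prop := ∀ (grid : List String), Dom_spin_cycle grid → Spec_spin_cycle grid (spin_cycle grid)

-- ===== LEMMAS AND PROOFS =====
theorem pv_toNat_ofNat {c : Nat} (h : c < 128) : (Char.ofNat c).toNat = c := by
  rw [Char.toNat_ofNat, if_pos]; exact Or.inl (by omega)

theorem pv_char_eq_iff_toNat {a b : Char} : a = b ↔ a.toNat = b.toNat := by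
  constructor
  · intro h; rw [h]
  · intro h
    have := congrArg Char.ofNat h
    rwa [Char.ofNat_toNat, Char.ofNat_toNat] at this

theorem pv_char_le_iff_toNat {a b : Char} : a ≤ b ↔ a.toNat ≤ b.toNat := by
  rw [Char.le_def, UInt32.le_iff_toNat_le]; exact Iff.rfl

-- counts after the bucket loop: bucket c holds the number of occurrences of chr(c)
theorem pvCounts_foldl (l : List Char) (cnt : List Nat) (c : Nat)
    (hlen : cnt.length = 128) (hl : ∀ ch ∈ l, ch.toNat < 128) (hc : c < 128) :
    (l.foldl (fun cnt ch => cnt.set ch.toNat (cnt.getD ch.toNat 0 + 1)) cnt).getD c 0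
      = cnt.getD c 0 + l.countP (fun ch => ch.toNat = c) := by
  induction l generalizing cnt with
  | nil => simp
  | cons ch t ih =>
    have hch : ch.toNat < 128 := hl ch (by simp)
    rw [List.foldl_cons, ih _ (by simp [hlen]) (fun x hx => hl x (by simp [hx]))]
    rw [List.countP_cons]
    have hget : ∀ (j : Nat) (L : List Nat) (v : Nat), (L.set j v).getD c 0 = if j = c ∧ j < L.length then v else L.getD c 0 := by
      intro j L v
      by_cases h1 : j = c
      · subst h1
        by_cases h2 : j < L.length
        · simp [List.getD, h2]
        · simp [List.getD, h2]
      · simp [List.getD, h1]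
    rw [hget]
    by_cases hEq : ch.toNat = c
    · simp [hEq, hlen, hc]; omega
    · simp [hEq, hlen]

theorem pvCountsOf_getD (seg : List Char) (c : Nat) (hseg : ∀ ch ∈ seg, ch.toNat < 128) (hc : c < 128) :
    (pvCountsOf seg).getD c 0 = seg.countP (fun ch => ch.toNat = c) := by
  rw [pvCountsOf, pvCounts_foldl seg _ c (by simp) hseg hc]
  rw [List.getD_replicate _ hc, Nat.zero_add]

theorem pv_sum_map_single (n k : Nat) (f : Nat → Nat) (hk : k < n)
    (hf : ∀ c, c < n → c ≠ k → f c = 0) : ((List.range n).map f).sum = f k := by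
  induction n with
  | zero => omega
  | succ n ih =>
    rw [List.range_succ, List.map_append, List.sum_append]
    by_cases hkn : k = n
    · subst hkn
      have : ((List.range k).map f).sum = 0 := by
        apply List.sum_eq_zero
        intro x hx
        simp only [List.mem_map, List.mem_range] at hx
        obtain ⟨c, hc, rfl⟩ := hx
        exact hf c (by omega) (by omega)
      simp [this]
    · rw [ih (by omega) (fun c h1 h2 => hf c (by omega) h2)]
      have : f n = 0 := hf n (by omega) (by omega)
      simp [this]

-- the counted output is a permutation of the segment
theorem pv_canon_perm (seg : List Char) (hseg : ∀ ch ∈ seg, ch.toNat < 128) :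
    ((List.range 128).flatMap
      (fun c => List.replicate (seg.countP (fun ch => ch.toNat = c)) (Char.ofNat c))).Perm seg := by
  rw [List.perm_iff_count]
  intro a
  rw [List.count_flatMap]
  rcases Nat.lt_or_ge a.toNat 128 with ha | ha
  · rw [pv_sum_map_single 128 a.toNat _ ha]
    · simp only [Function.comp_apply, List.count_replicate, Char.ofNat_toNat, BEq.rfl, if_pos]
      rw [List.count_eq_countP]
      apply List.countP_congr
      intro x _
      rw [decide_eq_true_iff, beq_iff_eq]
      exact pv_char_eq_iff_toNat.symm
    · intro c hc hne
      simp only [Function.comp_apply, List.count_replicate]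
      rw [if_neg]
      simp only [beq_iff_eq]
      intro hEq
      exact hne (by rw [← hEq, pv_toNat_ofNat hc])
  · have h1 : (∀ x ∈ (List.range 128).map
        (List.count a ∘ fun c => List.replicate (seg.countP (fun ch => ch.toNat = c)) (Char.ofNat c)), x = 0) := by
      intro x hx
      simp only [List.mem_map, List.mem_range] at hx
      obtain ⟨c, hc, rfl⟩ := hx
      simp only [Function.comp_apply, List.count_replicate]
      rw [if_neg]
      simp only [beq_iff_eq]
      intro hEq
      have := pv_toNat_ofNat (c := c) (by omega)
      rw [hEq] at this
      omega
    rw [List.sum_eq_zero h1, Eq.comm, List.count_eq_zero]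
    intro hmem
    exact absurd (hseg a hmem) (by omega)

-- blocks in range order are pairwise ≤ ; in reversed range order pairwise ≥
theorem pv_canon_pairwise (seg : List Char) :
    ((List.range 128).flatMap
      (fun c => List.replicate (seg.countP (fun ch => ch.toNat = c)) (Char.ofNat c))).Pairwise (· ≤ ·) := by
  rw [List.pairwise_flatMap]
  constructor
  · intro c _
    rw [List.pairwise_replicate]
    exact Or.inr le_rfl
  · have base : (List.range 128).Pairwise (fun a b => a ∈ List.range 128 ∧ b ∈ List.range 128 ∧ a < b) :=
      List.Pairwise.and_mem.mp List.pairwise_lt_range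
    apply base.imp
    intro a b ⟨hma, hmb, hab⟩ x hx y hy
    rw [List.eq_of_mem_replicate hx, List.eq_of_mem_replicate hy]
    rw [List.mem_range] at hma hmb
    rw [pv_char_le_iff_toNat, pv_toNat_ofNat hma, pv_toNat_ofNat hmb]
    omega

theorem pv_canon_pairwise_rev (seg : List Char) :
    (((List.range 128).reverse.flatMap
      (fun c => List.replicate (seg.countP (fun ch => ch.toNat = c)) (Char.ofNat c))).Pairwise (fun a b => b ≤ a)) := by
  rw [List.pairwise_flatMap]
  constructor
  · intro c _
    rw [List.pairwise_replicate]
    exact Or.inr le_rfl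
  · rw [List.pairwise_reverse]
    have base : (List.range 128).Pairwise (fun a b => a ∈ List.range 128 ∧ b ∈ List.range 128 ∧ a < b) :=
      List.Pairwise.and_mem.mp List.pairwise_lt_range
    apply base.imp
    intro a b ⟨hma, hmb, hab⟩ x hx y hy
    rw [List.eq_of_mem_replicate hx, List.eq_of_mem_replicate hy]
    rw [List.mem_range] at hma hmb
    rw [pv_char_le_iff_toNat, pv_toNat_ofNat hma, pv_toNat_ofNat hmb]
    omega

theorem pvEmit_eq_sorted (desc : Bool) (seg : List Char) (hseg : ∀ ch ∈ seg, ch.toNat < 128) :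
    pvEmit desc (pvCountsOf seg) = PySem.List.sorted seg (fun x => x) desc := by
  have hcongr : ∀ (l : List Nat), (∀ c ∈ l, c < 128) →
      l.flatMap (fun c => List.replicate ((pvCountsOf seg).getD c 0) (Char.ofNat c))
        = l.flatMap (fun c => List.replicate (seg.countP (fun ch => ch.toNat = c)) (Char.ofNat c)) := by
    intro l hl
    apply List.flatMap_congr
    intro c hc
    rw [pvCountsOf_getD seg c hseg (hl c hc)]
  cases desc with
  | false =>
    rw [pvEmit, if_neg (by simp), hcongr _ (fun c hc => List.mem_range.mp hc)]
    exact (PySem.List.sorted_id_eq_of_perm_of_pairwise seg _ (pv_canon_perm seg hseg) (pv_canon_pairwise seg)).symm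
  | true =>
    rw [pvEmit, if_pos rfl, hcongr _ (fun c hc => List.mem_range.mp (List.mem_reverse.mp hc))]
    have hperm : ((List.range 128).reverse.flatMap
        (fun c => List.replicate (seg.countP (fun ch => ch.toNat = c)) (Char.ofNat c))).Perm
        (PySem.List.sorted seg (fun x => x) true) := by
      apply List.Perm.trans _ (PySem.List.sorted_perm seg (fun x => x) true).symm
      apply List.Perm.trans (List.Perm.flatMap_right _ (List.reverse_perm _))
      exact pv_canon_perm seg hseg
    exact List.Perm.eq_of_pairwise
      (fun a b _ _ h1 h2 => le_antisymm h2 h1)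
      (pv_canon_pairwise_rev seg)
      (PySem.List.sorted_pairwise_rev seg (fun x => x))
      hperm

def pvSplitH : List Char → List (List Char)
  | [] => [[]]
  | c :: cs =>
    if c = '#' then [] :: pvSplitH cs
    else
      match pvSplitH cs with
      | [] => [[c]]
      | s :: ss => (c :: s) :: ss

theorem pvSplitH_ne_nil (l : List Char) : pvSplitH l ≠ [] := by
  match l with
  | [] => simp [pvSplitH]
  | c :: cs =>
    rw [pvSplitH]
    split_ifs
    · simp
    · match h : pvSplitH cs with
      | [] => simp
      | s :: ss => simp

theorem pv_go_eq (fuel : Nat) (l cur : List Char) (acc : List (List Char)) (h : l.length < fuel) :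
    PySem.Chars.splitOn.go ['#'] fuel l cur acc
      = acc.reverse ++ (pvSplitH l).modifyHead (fun s => cur.reverse ++ s) := by
  induction fuel generalizing l cur acc with
  | zero => omega
  | succ fuel ih =>
    match l with
    | [] => simp [PySem.Chars.splitOn.go, pvSplitH]
    | c :: rest =>
      rw [PySem.Chars.splitOn.go]
      by_cases hc : c = '#'
      · subst hc
        rw [if_pos (by simp [List.isPrefixOf])]
        rw [ih _ _ _ (by simp at h ⊢; omega)]
        rw [pvSplitH, if_pos rfl]
        match hs : pvSplitH rest with
        | [] => exact absurd hs (pvSplitH_ne_nil rest)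
        | s :: ss => simp
      · rw [if_neg (by simp [List.isPrefixOf]; intro hEq; exact hc hEq.symm)]
        rw [ih _ _ _ (by simp at h ⊢; omega)]
        rw [pvSplitH, if_neg hc]
        match hs : pvSplitH rest with
        | [] => exact absurd hs (pvSplitH_ne_nil rest)
        | s :: ss => simp

theorem pvSplitOn_eq (l : List Char) : PySem.Chars.splitOn l ['#'] = pvSplitH l := by
  rw [PySem.Chars.splitOn, pv_go_eq (l.length + 1) l [] [] (by omega)]
  match h : pvSplitH l with
  | [] => exact absurd h (pvSplitH_ne_nil l)
  | s :: ss => simp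

theorem pvSplitH_append (s d : List Char) (hs : ∀ x ∈ s, x ≠ '#') :
    pvSplitH (s ++ d) = (pvSplitH d).modifyHead (fun p => s ++ p) := by
  induction s with
  | nil =>
    match h : pvSplitH d with
    | [] => exact absurd h (pvSplitH_ne_nil d)
    | p :: ps => simp
  | cons c t ih =>
    have hc : c ≠ '#' := hs c (by simp)
    rw [List.cons_append, pvSplitH, if_neg hc, ih (fun x hx => hs x (by simp [hx]))]
    match h : pvSplitH d with
    | [] => exact absurd h (pvSplitH_ne_nil d)
    | p :: ps => simp

theorem pv_mem_pvSplitH (row seg : List Char) (h : seg ∈ pvSplitH row) : ∀ c ∈ seg, c ∈ row := by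
  induction row generalizing seg with
  | nil =>
    simp [pvSplitH] at h
    simp [h]
  | cons r rs ih =>
    intro c hc
    rw [pvSplitH] at h
    by_cases hr : r = '#'
    · rw [if_pos hr] at h
      rcases List.mem_cons.mp h with h1 | h1
      · subst h1; simp at hc
      · exact List.mem_cons_of_mem _ (ih seg h1 c hc)
    · rw [if_neg hr] at h
      match hsp : pvSplitH rs with
      | [] => exact absurd hsp (pvSplitH_ne_nil rs)
      | s :: ss =>
        rw [hsp] at h
        rcases List.mem_cons.mp h with h1 | h1
        · subst h1
          rcases List.mem_cons.mp hc with h2 | h2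
          · simp [h2]
          · exact List.mem_cons_of_mem _ (ih s (by simp [hsp]) c h2)
        · exact List.mem_cons_of_mem _ (ih seg (by simp [hsp, h1]) c hc)

theorem pv_join_cons (sep p : List Char) (Q : List (List Char)) :
    PySem.Chars.join sep (p :: Q) = p ++ PySem.Chars.join sep ([] :: Q) := by
  match Q with
  | [] => rw [PySem.Chars.join_singleton, PySem.Chars.join_singleton]; simp
  | q :: rest => rw [PySem.Chars.join_cons_cons, PySem.Chars.join_cons_cons]; simp

theorem pv_dropWhile_shape (cs : List Char) :
    cs.dropWhile (fun x => x ≠ '#') = [] ∨ ∃ d', cs.dropWhile (fun x => x ≠ '#') = '#' :: d' := by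
  induction cs with
  | nil => exact Or.inl rfl
  | cons x t ih =>
    by_cases hx : x = '#'
    · subst hx
      right
      exact ⟨t, by simp⟩
    · rw [List.dropWhile_cons]
      simp only [hx, ne_eq, not_false_eq_true, decide_true, if_true]
      exact ih

theorem pv_sorted_nil (desc : Bool) : PySem.List.sorted ([] : List Char) (fun x => x) desc = [] := by
  simp [PySem.List.sorted]

theorem pvTiltLineB_eq (desc : Bool) (row : List Char) :
    (∀ c ∈ row, c.toNat < 128) → pvTiltLineB desc row
      = PySem.Chars.join ['#'] ((pvSplitH row).map (fun seg => PySem.List.sorted seg (fun x => x) desc)) := by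
  induction row using pvTiltLineB.induct with
  | case1 =>
    intro h
    rw [pvTiltLineB, pvSplitH]
    simp [PySem.Chars.join_singleton, PySem.List.sorted]
  | case2 cs ih =>
    intro h
    rw [pvTiltLineB, if_pos rfl, pvSplitH, if_pos rfl]
    rw [ih (fun c hc => h c (by simp [hc]))]
    match hs : pvSplitH cs with
    | [] => exact absurd hs (pvSplitH_ne_nil cs)
    | s :: ss =>
      rw [List.map_cons, List.map_cons, pv_sorted_nil, List.map_cons, PySem.Chars.join_cons_cons]
      simp
  | case3 x0 cs hc ih =>
    intro h
    rw [pvTiltLineB, if_neg hc]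
    have hseg : ∀ y ∈ (x0 :: cs.takeWhile (fun z => z ≠ '#')), y.toNat < 128 := by
      intro y hy
      rcases List.mem_cons.mp hy with h1 | h1
      · rw [h1]; exact h x0 (by simp)
      · exact h y (List.mem_cons_of_mem _ (List.takeWhile_subset _ h1))
    rw [pvEmit_eq_sorted desc _ hseg]
    have hd : ∀ y ∈ cs.dropWhile (fun z => z ≠ '#'), y.toNat < 128 :=
      fun y hy => h y (List.mem_cons_of_mem _ (List.dropWhile_subset _ hy))
    rw [ih hd]
    have hsplit_row : (x0 :: cs) = (x0 :: cs.takeWhile (fun z => z ≠ '#')) ++ cs.dropWhile (fun z => z ≠ '#') := by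
      simp [List.takeWhile_append_dropWhile]
    have hnohash : ∀ y ∈ (x0 :: cs.takeWhile (fun z => z ≠ '#')), y ≠ '#' := by
      intro y hy
      rcases List.mem_cons.mp hy with h1 | h1
      · rw [h1]; exact hc
      · have := List.mem_takeWhile_imp h1
        simpa using this
    rw [hsplit_row, pvSplitH_append _ _ hnohash]
    rcases pv_dropWhile_shape cs with hshape | ⟨d', hshape⟩
    · rw [hshape, pvSplitH]
      simp only [List.modifyHead, List.map_cons, List.map_nil]
      simp only [List.append_nil]
      rw [pv_sorted_nil, PySem.Chars.join_singleton, List.append_nil, PySem.Chars.join_singleton]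
    · rw [hshape, pvSplitH, if_pos rfl]
      simp only [List.modifyHead, List.append_nil, List.map_cons]
      conv_rhs => rw [pv_join_cons]
      congr 1

theorem pvTilt_eq (rev : Bool) (row : List Char) (h : ∀ c ∈ row, c.toNat < 128) :
    pvTiltRowA rev row = pvTiltLineB rev row := by
  rw [pvTiltRowA, pvSplitOn_eq, pvTiltLineB_eq rev row h]
  congr 1
  apply List.map_congr_left
  intro seg _
  exact PySem.Chars.join_nil_singletons _

theorem pv_mem_join (P : List (List Char)) (c : Char) (h : c ∈ PySem.Chars.join ['#'] P) :
    c = '#' ∨ ∃ p ∈ P, c ∈ p := by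
  induction P with
  | nil => rw [PySem.Chars.join_nil] at h; simp at h
  | cons p Q ih =>
    rw [pv_join_cons] at h
    rcases List.mem_append.mp h with h1 | h1
    · exact Or.inr ⟨p, by simp, h1⟩
    · match Q with
      | [] =>
        rw [PySem.Chars.join_singleton] at h1
        simp at h1
      | q :: rest =>
        rw [PySem.Chars.join_cons_cons] at h1
        simp only [List.nil_append] at h1
        rcases List.mem_append.mp h1 with h2 | h2
        · left; simpa using h2
        · rcases ih h2 with h3 | ⟨p', hp', hc'⟩
          · exact Or.inl h3
          · exact Or.inr ⟨p', by simp [hp'], hc'⟩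

theorem pv_ascii_tiltRowA (rev : Bool) (row : List Char) (h : ∀ c ∈ row, c.toNat < 128) :
    ∀ c ∈ pvTiltRowA rev row, c.toNat < 128 := by
  intro c hc
  rw [pvTiltRowA, pvSplitOn_eq] at hc
  rcases pv_mem_join _ c hc with h1 | ⟨p, hp, hcp⟩
  · subst h1; decide
  · simp only [List.mem_map] at hp
    obtain ⟨seg, hseg, rfl⟩ := hp
    rw [PySem.Chars.join_nil_singletons] at hcp
    have : c ∈ seg := (PySem.List.mem_sorted _ _ _ _).mp hcp
    exact h c (pv_mem_pvSplitH row seg hseg c this)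

theorem pvHeadsTails_spec (g : List (List Char)) (hs : List Char) (ts : List (List Char))
    (h : pvHeadsTails g = some (hs, ts)) :
    hs = g.map (fun r => r.headD ' ') ∧ ts = g.map List.tail ∧ ∀ r ∈ g, r ≠ [] := by
  induction g generalizing hs ts with
  | nil =>
    simp [pvHeadsTails] at h
    obtain ⟨h1, h2⟩ := h
    subst h1; subst h2
    simp
  | cons r rest ih =>
    match r with
    | [] => simp [pvHeadsTails] at h
    | c :: cs =>
      simp only [pvHeadsTails, Option.map_eq_some_iff] at h
      obtain ⟨⟨hs', ts'⟩, hrec, heq⟩ := h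
      cases heq
      obtain ⟨h1, h2, h3⟩ := ih hs' ts' hrec
      refine ⟨by simp [h1], by simp [h2], ?_⟩
      intro r hr
      rcases List.mem_cons.mp hr with h4 | h4
      · simp [h4]
      · exact h3 r h4

theorem pvHeadsTails_none (g : List (List Char)) (h : pvHeadsTails g = none) :
    ∃ r ∈ g, r = [] := by
  induction g with
  | nil => simp [pvHeadsTails] at h
  | cons r rest ih =>
    match r with
    | [] => exact ⟨[], by simp⟩
    | c :: cs =>
      simp only [pvHeadsTails, Option.map_eq_none_iff] at h
      obtain ⟨r', hr', hre⟩ := ih h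
      exact ⟨r', by simp [hr'], hre⟩

-- the foldl underlying PySem.List.min? (identity key) on Nat
theorem pv_minfold_sub (f : Option Nat → Nat → Option Nat)
    (hf : ∀ m x, f (some m) x = if x < m then some x else some m) :
    ∀ (l : List Nat) (a : Nat), ∃ k, l.foldl f (some a) = some k := by
  intro l
  induction l with
  | nil => exact fun a => ⟨a, rfl⟩
  | cons x t ih =>
    intro a
    rw [List.foldl_cons, hf]
    by_cases hx : x < a
    · simpa [hx] using ih x
    · simpa [hx] using ih a

theorem pv_minfold_some (f : Option Nat → Nat → Option Nat)
    (hf0 : ∀ x, f none x = some x)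
    (hf : ∀ m x, f (some m) x = if x < m then some x else some m)
    (l : List Nat) (hl : l ≠ []) : ∃ k, l.foldl f none = some k := by
  match l with
  | [] => exact absurd rfl hl
  | x :: t =>
    rw [List.foldl_cons, hf0]
    exact pv_minfold_sub f hf t x

theorem pv_min?_some (l : List Nat) (hl : l ≠ []) :
    ∃ k, PySem.List.min? l (fun x => x) = some k := by
  rw [PySem.List.min?]
  exact pv_minfold_some _ (fun x => rfl) (fun m x => rfl) l hl

theorem pv_minfold_succ (f : Option Nat → Nat → Option Nat)
    (hf0 : ∀ x, f none x = some x)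
    (hf : ∀ m x, f (some m) x = if x < m then some x else some m) :
    ∀ (l : List Nat) (a : Option Nat),
      (l.map (· + 1)).foldl f (a.map (· + 1)) = (l.foldl f a).map (· + 1) := by
  intro l
  induction l with
  | nil => intro a; simp
  | cons x t ih =>
    intro a
    simp only [List.map_cons, List.foldl_cons]
    match a with
    | none =>
      rw [Option.map_none, hf0, hf0, ← Option.map_some]
      exact ih (some x)
    | some m =>
      rw [Option.map_some, hf, hf]
      by_cases hx : x < m
      · rw [if_pos (by omega : x + 1 < m + 1), if_pos hx, ← Option.map_some]
        exact ih (some x)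
      · rw [if_neg (by omega : ¬ x + 1 < m + 1), if_neg hx, ← Option.map_some]
        exact ih (some m)

theorem pv_min?_succ (l : List Nat) :
    PySem.List.min? (l.map (· + 1)) (fun x => x) = (PySem.List.min? l (fun x => x)).map (· + 1) := by
  rw [PySem.List.min?, PySem.List.min?]
  exact pv_minfold_succ _ (fun x => rfl) (fun m x => rfl) l none

theorem pvZipStar_nil_of_none (g : List (List Char)) (hg : g ≠ []) (hn : pvHeadsTails g = none) :
    pvZipStar g = [] := by
  rw [pvZipStar, dif_neg hg]
  split
  · rfl
  · rename_i hs ts hsome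
    rw [hn] at hsome
    cases hsome

theorem pvZipStar_cons_of_some (g : List (List Char)) (hg : g ≠ []) (hs : List Char)
    (ts : List (List Char)) (hsome : pvHeadsTails g = some (hs, ts)) :
    pvZipStar g = hs :: pvZipStar ts := by
  rw [pvZipStar, dif_neg hg]
  split
  · rename_i hnone
    rw [hsome] at hnone
    cases hnone
  · rename_i hs' ts' hsome'
    rw [hsome] at hsome'
    cases hsome'
    rfl

theorem pvZipStar_eq (g : List (List Char)) : pvZipStar g = pvTransposeB g := by
  induction g using pvZipStar.induct with
  | case1 => rw [pvZipStar, dif_pos rfl, pvTransposeB, if_pos rfl]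
  | case2 g hg hnone =>
    rw [pvZipStar_nil_of_none g hg hnone, pvTransposeB, if_neg hg]
    obtain ⟨r, hr, hre⟩ := pvHeadsTails_none g hnone
    have h0 : (0 : Nat) ∈ g.map List.length := by
      simp only [List.mem_map]
      exact ⟨r, hr, by rw [hre]; rfl⟩
    have hgl : g.map List.length ≠ [] := by
      intro hEq; rw [hEq] at h0; simp at h0
    obtain ⟨k, hk⟩ := pv_min?_some (g.map List.length) hgl
    have hk0 : k = 0 := Nat.le_zero.mp (PySem.List.min?_isMin hk 0 h0)
    simp [PySem.List.minD, hk, hk0]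
  | case3 g hg hs ts hsome ih =>
    obtain ⟨hh, ht, hne⟩ := pvHeadsTails_spec g hs ts hsome
    rw [pvZipStar_cons_of_some g hg hs ts hsome, ih]
    have hts : ts ≠ [] := by
      intro hEq
      rw [ht] at hEq
      exact hg (List.map_eq_nil_iff.mp hEq)
    have hmap : g.map List.length = (ts.map List.length).map (· + 1) := by
      rw [ht, List.map_map, List.map_map]
      apply List.map_congr_left
      intro r hr
      have := hne r hr
      match r with
      | [] => exact absurd rfl this
      | a :: b => simp
    have htl : ts.map List.length ≠ [] := by
      simpa [List.map_eq_nil_iff] using hts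
    obtain ⟨mt, hmt⟩ := pv_min?_some (ts.map List.length) htl
    rw [pvTransposeB, pvTransposeB, if_neg hts, if_neg hg]
    simp only [PySem.List.minD]
    rw [hmap, pv_min?_succ, hmt]
    simp only [Option.map_some, Option.getD_some]
    rw [List.range_succ_eq_map]
    rw [List.map_cons]
    congr 1
    · rw [hh]
      apply List.map_congr_left
      intro r hr
      have := hne r hr
      match r with
      | [] => exact absurd rfl this
      | a :: b => rfl
    · rw [List.map_map]
      apply List.map_congr_left
      intro j _
      rw [ht, List.map_map]
      apply List.map_congr_left
      intro r hr
      have := hne r hr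
      match r with
      | [] => exact absurd rfl this
      | a :: b => rfl

theorem pv_mem_zipStar (g : List (List Char)) :
    ∀ col ∈ pvZipStar g, ∀ c ∈ col, ∃ r ∈ g, c ∈ r := by
  induction g using pvZipStar.induct with
  | case1 =>
    intro col hcol
    rw [pvZipStar, dif_pos rfl] at hcol
    simp at hcol
  | case2 g hg hnone =>
    intro col hcol
    rw [pvZipStar_nil_of_none g hg hnone] at hcol
    simp at hcol
  | case3 g hg hs ts hsome ih =>
    intro col hcol c hc
    obtain ⟨hh, ht, hne⟩ := pvHeadsTails_spec g hs ts hsome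
    rw [pvZipStar_cons_of_some g hg hs ts hsome] at hcol
    rcases List.mem_cons.mp hcol with h1 | h1
    · subst h1
      rw [hh] at hc
      simp only [List.mem_map] at hc
      obtain ⟨r, hr, hrc⟩ := hc
      refine ⟨r, hr, ?_⟩
      have := hne r hr
      match r with
      | [] => exact absurd rfl this
      | a :: b => rw [← hrc]; simp
    · obtain ⟨r', hr', hcr'⟩ := ih col h1 c hc
      rw [ht] at hr'
      simp only [List.mem_map] at hr'
      obtain ⟨r, hr, hrt⟩ := hr'
      exact ⟨r, hr, List.mem_of_mem_tail (by rw [hrt]; exact hcr')⟩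

theorem pv_stage (rev : Bool) (g : List (List Char)) (h : ∀ row ∈ g, ∀ c ∈ row, c.toNat < 128) :
    ((pvZipStar g).map (pvTiltRowA rev) = (pvTransposeB g).map (pvTiltLineB rev))
    ∧ ∀ row ∈ (pvZipStar g).map (pvTiltRowA rev), ∀ c ∈ row, c.toNat < 128 := by
  have hcols : ∀ col ∈ pvZipStar g, ∀ c ∈ col, c.toNat < 128 := by
    intro col hcol c hc
    obtain ⟨r, hr, hcr⟩ := pv_mem_zipStar g col hcol c hc
    exact h r hr c hcr
  constructor
  · rw [← pvZipStar_eq]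
    apply List.map_congr_left
    intro col hcol
    exact pvTilt_eq rev col (hcols col hcol)
  · intro row hrow c hc
    simp only [List.mem_map] at hrow
    obtain ⟨col, hcol, rfl⟩ := hrow
    exact pv_ascii_tiltRowA rev col (hcols col hcol) c hc


-- ===== VERDICT (by name: the statement is the Claim_ definition above) =====
theorem spin_cycle_spec : Claim_equal_spin_cycle := by
  intro grid hdom
  unfold Spec_spin_cycle
  simp only [spin_cycle, spin_cycle_alt, List.foldl_cons, List.foldl_nil]
  have h0 : ∀ row ∈ grid.map String.toList, ∀ c ∈ row, c.toNat < 128 := by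
    intro row hrow c hc
    simp only [List.mem_map] at hrow
    obtain ⟨s, hsmem, rfl⟩ := hrow
    have hd : pvDomStr s = true := by
      unfold Dom_spin_cycle at hdom
      rw [List.all_eq_true] at hdom
      exact hdom s hsmem
    unfold pvDomStr at hd
    rw [List.all_eq_true] at hd
    have := hd c hc
    unfold pvDomChar at this
    simp only [Bool.or_eq_true, Bool.and_eq_true, decide_eq_true_eq, beq_iff_eq] at this
    omega
  obtain ⟨e1, a1⟩ := pv_stage true _ h0
  obtain ⟨e2, a2⟩ := pv_stage true _ a1
  obtain ⟨e3, a3⟩ := pv_stage false _ a2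
  obtain ⟨e4, a4⟩ := pv_stage false _ a3
  rw [← e1, ← e2, ← e3, ← e4]
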